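-- pv_equiv track=rewrite | github.com/RuslanKravchuk2907/practice | MA.py | count_networking
-- ===== SOURCE A (Python) =====
-- def count_networking(quarantine_length: int, frequency: int) -> int:
--     # Якщо карантин триває весь рік або довше, вечірок не буде
--     if quarantine_length >= 12:
--         return 0
--
--     # Перший місяць після завершення карантину
--     start_month = quarantine_length + 1
--
--     # Підраховуємо кількість вечірок
--     party_count = 0
--     for month in range(start_month, 13):
--         if (month - start_month) % frequency == 0:
--             party_count += 1
--
--     return party_count
-- ===== SOURCE B (Python) =====
-- def count_networking(quarantine_length: int, frequency: int) -> int: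
--     if quarantine_length >= 12:
--         return 0
--     # months with parties are start, start+|f|, start+2|f|, ... up to 12:
--     # that is 1 + floor(span / |f|) with span = 12 - start = 11 - quarantine_length
--     return (11 - quarantine_length) // abs(frequency) + 1
-- ===== Notes on version B (the rewrite author's own statement) =====
-- stated objective: faster
-- what changed: Replaces the month-by-month loop (which for very negative quarantine_length iterates ~|quarantine_length| times) with the closed form (11 - quarantine_length) // abs(frequency) + 1 counting the evenly spaced party months directly.
import Mathlib
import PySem

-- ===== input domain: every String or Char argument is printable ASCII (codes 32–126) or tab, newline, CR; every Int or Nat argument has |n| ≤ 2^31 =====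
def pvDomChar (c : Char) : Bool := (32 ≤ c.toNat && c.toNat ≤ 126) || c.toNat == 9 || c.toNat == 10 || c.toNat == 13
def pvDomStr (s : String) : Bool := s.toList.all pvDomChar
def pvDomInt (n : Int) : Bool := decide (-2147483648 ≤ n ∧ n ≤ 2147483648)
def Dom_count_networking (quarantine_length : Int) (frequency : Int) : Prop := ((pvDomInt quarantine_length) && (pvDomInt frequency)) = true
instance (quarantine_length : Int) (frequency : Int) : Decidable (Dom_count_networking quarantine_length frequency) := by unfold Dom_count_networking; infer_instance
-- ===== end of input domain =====

-- B replaces A's month-by-month loop with the closed form (11 - q) // abs(f) + 1 (objective: faster).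
-- ===== PORT A =====
def count_networking (quarantine_length : Int) (frequency : Int) : Int :=
  if quarantine_length ≥ 12 then 0
  else
    let start_month := quarantine_length + 1
    (PySem.List.pyRange start_month 13 1).foldl
      (fun party_count month =>
        if PySem.Int.mod (month - start_month) frequency = 0 then party_count + 1 else party_count)
      0

-- ===== PORT B =====
def count_networking_alt (quarantine_length : Int) (frequency : Int) : Int :=
  if quarantine_length ≥ 12 then 0
  else PySem.Int.floordiv (11 - quarantine_length) |frequency| + 1

-- ===== PRECONDITION & SPEC =====
-- Pre_ excludes exactly the inputs where Python A raises ZeroDivisionError: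
-- frequency = 0 with quarantine_length < 12 (the '% frequency' in the loop body).
def Pre_count_networking (quarantine_length : Int) (frequency : Int) : Prop :=
  frequency ≠ 0 ∨ quarantine_length ≥ 12
instance (quarantine_length : Int) (frequency : Int) : Decidable (Pre_count_networking quarantine_length frequency) := by unfold Pre_count_networking; infer_instance

def pvWitness_count_networking : Int × Int := (3, 2)

def Spec_count_networking (quarantine_length : Int) (frequency : Int) (out : Int) : Prop := out = count_networking_alt quarantine_length frequency
instance (quarantine_length : Int) (frequency : Int) (out : Int) : Decidable (Spec_count_networking quarantine_length frequency out) := by unfold Spec_count_networking; infer_instance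

-- ===== CLAIM (what is proved, stated in full; the proofs are below) =====
def Claim_equal_count_networking : Prop := ∀ (quarantine_length : Int) (frequency : Int), Dom_count_networking quarantine_length frequency → Pre_count_networking quarantine_length frequency → Spec_count_networking quarantine_length frequency (count_networking quarantine_length frequency)

-- ===== LEMMAS AND PROOFS =====

-- the loop over 0..N counts the multiples of d: there are N/d + 1 of them
lemma count_fold (d : Nat) (hd : 0 < d) :
    ∀ (N : Nat) (acc : Int),
      (List.range (N+1)).foldl (fun a k => if d ∣ k then a + 1 else a) acc
        = acc + (N / d : Nat) + 1 := by
  intro N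
  induction N with
  | zero => intro acc; simp [Nat.div_eq_of_lt hd]
  | succ n ih =>
      intro acc
      rw [List.range_succ, List.foldl_append, ih]
      have h := @Nat.succ_div n d
      by_cases hdvd : d ∣ n + 1
      · simp [hdvd, h]
        omega
      · simp [hdvd, h]

-- ===== VERDICT (by name: the statement is the Claim_ definition above) =====
theorem count_networking_spec : Claim_equal_count_networking := by
  intro q f _ hpre
  unfold Spec_count_networking count_networking count_networking_alt
  by_cases hq : q ≥ 12
  · simp [hq]
  · have hf : f ≠ 0 := by
      rcases hpre with h | h
      · exact h
      · omega
    rw [if_neg hq, if_neg hq]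
    simp only [PySem.List.pyRange_one, List.foldl_map]
    have hd : 0 < f.natAbs := Int.natAbs_pos.mpr hf
    have hfun : (fun (a : Int) (k : Nat) =>
        if PySem.Int.mod (q + 1 + (k : Int) - (q + 1)) f = 0 then a + 1 else a)
        = (fun (a : Int) (k : Nat) => if f.natAbs ∣ k then a + 1 else a) := by
      funext a k
      have hk : q + 1 + (k : Int) - (q + 1) = (k : Int) := by ring
      simp only [hk, PySem.Int.mod_eq_zero_iff_dvd]
      by_cases hdvd : f.natAbs ∣ k
      · rw [if_pos (Int.natAbs_dvd.mp (Int.natCast_dvd_natCast.mpr hdvd)), if_pos hdvd]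
      · rw [if_neg (fun hc => hdvd (Int.natCast_dvd_natCast.mp (Int.natAbs_dvd.mpr hc))),
            if_neg hdvd]
    rw [hfun, show (13 - (q + 1)).toNat = (11 - q).toNat + 1 from by omega,
        count_fold f.natAbs hd ((11 - q).toNat) 0,
        PySem.Int.floordiv_eq_ediv_of_pos (abs_pos.mpr hf),
        Int.natCast_div,
        show ((11 - q).toNat : Int) = 11 - q from by omega,
        show ((f.natAbs : Nat) : Int) = |f| from (Int.abs_eq_natAbs f).symm,
        zero_add]
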